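-- pv_equiv track=rewrite | github.com/martamako/AdventOfCode | 2015/Day11/2015-day11-1.py | rule3
-- ===== SOURCE A (Python) =====
-- def rule3(text: str) -> bool:
--     first_pair = ""
--     for i in range(len(text)-1):
--         if text[i] == text[i+1]:
--             if first_pair == "":
--                 first_pair += text[i] + text[i + 1]
--             elif first_pair != "":
--                 second_pair = text[i] + text[i+1]
--                 if first_pair != second_pair:
--                     return True
--     return False
-- ===== SOURCE B (Python) =====
-- def rule3(text: str) -> bool:
--     return sum(1 for c in set(text) if c + c in text) >= 2
-- ===== Notes on version B (the rewrite author's own statement) =====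
-- stated objective: alternative
-- what changed: Instead of scanning adjacent positions with a first-pair sentinel and early return, B iterates over the distinct characters of the string and counts those whose doubled form c+c occurs as a substring, returning whether that count is at least 2.
import Mathlib
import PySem

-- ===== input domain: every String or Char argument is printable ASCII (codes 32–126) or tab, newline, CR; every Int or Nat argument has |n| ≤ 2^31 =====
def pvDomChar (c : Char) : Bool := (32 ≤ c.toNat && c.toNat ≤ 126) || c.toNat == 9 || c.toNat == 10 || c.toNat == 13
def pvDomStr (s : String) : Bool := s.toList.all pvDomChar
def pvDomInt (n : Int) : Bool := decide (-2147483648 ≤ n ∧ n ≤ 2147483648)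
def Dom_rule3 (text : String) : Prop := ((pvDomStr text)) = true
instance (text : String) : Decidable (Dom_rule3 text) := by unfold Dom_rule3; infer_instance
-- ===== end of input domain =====

-- B drops A's adjacent-position scan entirely: it counts the distinct characters c whose doubled
-- form c+c occurs as a substring of the text and tests whether that count is at least 2 (objective: alternative).

-- ===== PORT A =====
-- the loop over i in range(len(text)-1): compare text[i] with text[i+1], carry first_pair, early return True
def rule3Go : List Char → String → Bool
  | a :: b :: t, first_pair =>
    if a = b then
      if first_pair = "" then rule3Go (b :: t) (String.ofList [a, b])
      else
        -- elif first_pair != "": second_pair = text[i] + text[i+1]; if first_pair != second_pair: return True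
        if first_pair ≠ String.ofList [a, b] then true
        else rule3Go (b :: t) first_pair
    else rule3Go (b :: t) first_pair
  | _, _ => false

def rule3 (text : String) : Bool := rule3Go text.toList ""

-- ===== PORT B =====
-- sum(1 for c in set(text) if c + c in text) >= 2 : count over the distinct characters (countP = the 0/1 sum)
def rule3_alt (text : String) : Bool :=
  decide (2 ≤ (PySem.Set.ofList text.toList).countP
    (fun c => PySem.Chars.isIn [c, c] text.toList))

-- ===== PRECONDITION & SPEC =====
def Spec_rule3 (text : String) (out : Bool) : Prop := out = rule3_alt text
instance (text : String) (out : Bool) : Decidable (Spec_rule3 text out) := by unfold Spec_rule3; infer_instance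

-- ===== CLAIM (what is proved, stated in full; the proofs are below) =====
def Claim_equal_rule3 : Prop := ∀ (text : String), Dom_rule3 text → Spec_rule3 text (rule3 text)

-- ===== LEMMAS AND PROOFS =====

-- proof-side characterisation: the letters text[i] with text[i] == text[i+1], in scan order
def dblLetters : List Char → List Char
  | a :: b :: t => if a = b then a :: dblLetters (b :: t) else dblLetters (b :: t)
  | _ => []

-- one unfolding of A's loop on a list with at least two elements
theorem rule3Go_step (a b : Char) (t : List Char) (fp : String) : rule3Go (a :: b :: t) fp =
    (if a = b then
      if fp = "" then rule3Go (b :: t) (String.ofList [a, b])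
      else if fp ≠ String.ofList [a, b] then true
      else rule3Go (b :: t) fp
    else rule3Go (b :: t) fp) := rfl

theorem ofList_pair_ne_nil (c : Char) : String.ofList [c, c] ≠ "" := by
  intro h
  have := congrArg String.toList h
  simp at this

theorem ofList_pair_inj (c a : Char) (h : ¬ c = a) : String.ofList [c, c] ≠ String.ofList [a, a] := by
  intro he
  have := congrArg String.toList he
  simp at this
  exact h this

-- A's loop with sentinel [c,c] returns true iff some remaining doubled letter differs from c
theorem rule3Go_pair (cs : List Char) (c : Char) :
    rule3Go cs (String.ofList [c, c]) = true ↔ ∃ x ∈ dblLetters cs, x ≠ c := by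
  fun_induction dblLetters cs with
  | case1 a t ih =>
    by_cases hca : c = a
    · subst hca
      rw [rule3Go_step, if_pos rfl, if_neg (ofList_pair_ne_nil c),
        if_neg (by simp), ih]
      simp
    · rw [rule3Go_step, if_pos rfl, if_neg (ofList_pair_ne_nil c),
        if_pos (ofList_pair_inj c a hca)]
      simp
      exact Or.inl (Ne.symm hca)
  | case2 a b t h ih =>
    rw [rule3Go_step, if_neg h, ih]
  | case3 t h =>
    match t, h with
    | [], _ => simp [rule3Go]
    | [a], _ => simp [rule3Go]
    | a :: b :: t, h => exact (h a b t rfl).elim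

-- A's loop with the sentinel still empty returns true iff two distinct doubled letters remain
theorem rule3Go_empty (cs : List Char) :
    rule3Go cs "" = true ↔ ∃ x ∈ dblLetters cs, ∃ y ∈ dblLetters cs, x ≠ y := by
  fun_induction dblLetters cs with
  | case1 a t ih =>
    rw [rule3Go_step, if_pos rfl, if_pos rfl, rule3Go_pair]
    constructor
    · rintro ⟨x, hx, hxa⟩
      exact ⟨a, List.mem_cons_self, x, List.mem_cons_of_mem a hx, Ne.symm hxa⟩
    · rintro ⟨x, hx, y, hy, hxy⟩
      rcases List.mem_cons.mp hx with rfl | hx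
      · rcases List.mem_cons.mp hy with rfl | hy
        · exact absurd rfl hxy
        · exact ⟨y, hy, Ne.symm hxy⟩
      · by_cases hxa : x = a
        · subst hxa
          rcases List.mem_cons.mp hy with rfl | hy
          · exact absurd rfl hxy
          · exact ⟨y, hy, Ne.symm hxy⟩
        · exact ⟨x, hx, hxa⟩
  | case2 a b t h ih =>
    rw [rule3Go_step, if_neg h, ih]
  | case3 t h =>
    match t, h with
    | [], _ => simp [rule3Go]
    | [a], _ => simp [rule3Go]
    | a :: b :: t, h => exact (h a b t rfl).elim

-- [c,c] occurs as a substring iff c is one of the doubled letters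
theorem infix_pair_iff (l : List Char) (c : Char) :
    [c, c] <:+: l ↔ c ∈ dblLetters l := by
  fun_induction dblLetters l with
  | case1 a t ih =>
    rw [List.infix_cons_iff]
    simp only [List.mem_cons]
    rw [ih]
    constructor
    · rintro (hp | h)
      · rcases List.cons_prefix_cons.mp hp with ⟨rfl, _⟩
        exact Or.inl rfl
      · exact Or.inr h
    · rintro (rfl | h)
      · exact Or.inl (by simp [List.cons_prefix_cons])
      · exact Or.inr h
  | case2 a b t h ih =>
    rw [List.infix_cons_iff, ih]
    constructor
    · rintro (hp | hh)
      · rcases List.cons_prefix_cons.mp hp with ⟨rfl, hp2⟩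
        rcases List.cons_prefix_cons.mp hp2 with ⟨rfl, _⟩
        exact absurd rfl h
      · exact hh
    · exact Or.inr
  | case3 t h =>
    match t, h with
    | [], _ => simp
    | [a], _ =>
      simp only [List.not_mem_nil, iff_false]
      intro hinf
      have := hinf.length_le
      simp at this
    | a :: b :: t, h => exact (h a b t rfl).elim

theorem mem_dblLetters_mem (l : List Char) (c : Char) (h : c ∈ dblLetters l) : c ∈ l := by
  fun_induction dblLetters l with
  | case1 a t ih =>
    rcases List.mem_cons.mp h with rfl | h'
    · exact List.mem_cons_self
    · exact List.mem_cons_of_mem a (ih h')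
  | case2 a b t hne ih => exact List.mem_cons_of_mem a (ih h)
  | case3 t ht =>
    match t, ht with
    | [], _ => simp at h
    | [a], _ => simp at h
    | a :: b :: t, ht => exact (ht a b t rfl).elim

-- a duplicate-free list has length ≥ 2 iff it holds two distinct elements
theorem two_le_length_nodup (l : List Char) (nd : l.Nodup) :
    2 ≤ l.length ↔ ∃ x ∈ l, ∃ y ∈ l, x ≠ y := by
  match l, nd with
  | [], _ => simp
  | [z], _ =>
    simp only [List.length_singleton, List.mem_singleton]
    constructor
    · omega
    · rintro ⟨x, rfl, y, rfl, hxy⟩; exact absurd rfl hxy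
  | x :: y :: t, nd =>
    have hxy : x ≠ y := by
      intro hxy; subst hxy; exact (List.nodup_cons.mp nd).1 List.mem_cons_self
    simp only [List.length_cons]
    constructor
    · intro _
      exact ⟨x, List.mem_cons_self, y, List.mem_cons_of_mem x List.mem_cons_self, hxy⟩
    · intro _; omega

-- ===== VERDICT (by name: the statement is the Claim_ definition above) =====
theorem rule3_spec : Claim_equal_rule3 := by
  intro text _
  show rule3Go text.toList "" =
    decide (2 ≤ (PySem.Set.ofList text.toList).countP
      (fun c => PySem.Chars.isIn [c, c] text.toList))
  rw [Bool.eq_iff_iff]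
  simp only [decide_eq_true_eq]
  rw [rule3Go_empty]
  rw [List.countP_eq_length_filter,
    two_le_length_nodup _ ((PySem.Set.nodup_ofList text.toList).filter _)]
  constructor
  · rintro ⟨x, hx, y, hy, hxy⟩
    refine ⟨x, ?_, y, ?_, hxy⟩ <;>
      simp only [List.mem_filter, PySem.Set.mem_ofList, PySem.Chars.isIn_iff_infix,
        infix_pair_iff]
    · exact ⟨mem_dblLetters_mem _ _ hx, by simpa using hx⟩
    · exact ⟨mem_dblLetters_mem _ _ hy, by simpa using hy⟩
  · rintro ⟨x, hx, y, hy, hxy⟩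
    simp only [List.mem_filter, PySem.Set.mem_ofList,
      PySem.Chars.isIn_iff_infix, infix_pair_iff] at hx hy
    exact ⟨x, hx.2, y, hy.2, hxy⟩
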